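-- pv_equiv track=rewrite | github.com/Hanadoggy/py_algorithm | My_implementation.py | calc_15683
-- ===== SOURCE A (Python) =====
-- def calc_15683(row, col, cctv, index, angle, check, n):
--     count = 0
--     for i in range(len(angle[cctv[n][2]][(index[n] % len(angle[cctv[n][2]]))])):
--         if angle[cctv[n][2]][(index[n] % len(angle[cctv[n][2]]))][i] == 0:
--             for x in range(cctv[n][1] + 1, col):
--                 if check[cctv[n][0]][x] == 0:
--                     check[cctv[n][0]][x] = 7
--                     count += 1
--                 elif check[cctv[n][0]][x] == 6:
--                     break
--         elif angle[cctv[n][2]][(index[n] % len(angle[cctv[n][2]]))][i] == 1: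
--             for y in range(cctv[n][0] + 1, row):
--                 if check[y][cctv[n][1]] == 0:
--                     check[y][cctv[n][1]] = 7
--                     count += 1
--                 elif check[y][cctv[n][1]] == 6:
--                     break
--         elif angle[cctv[n][2]][(index[n] % len(angle[cctv[n][2]]))][i] == 2:
--             for x in range(cctv[n][1] - 1, -1, -1):
--                 if check[cctv[n][0]][x] == 0:
--                     check[cctv[n][0]][x] = 7
--                     count += 1
--                 elif check[cctv[n][0]][x] == 6:
--                     break
--         else:
--             for y in range(cctv[n][0] - 1, -1, -1):
--                 if check[y][cctv[n][1]] == 0: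
--                     check[y][cctv[n][1]] = 7
--                     count += 1
--                 elif check[y][cctv[n][1]] == 6:
--                     break
--     return count
-- ===== SOURCE B (Python) =====
-- # B: two-phase pure computation instead of A's mutate-as-you-count scan: first collect
-- # the SET of covered cells reading only the original grid (valid because only value 6
-- # blocks a ray and A's writes only turn 0s into 7s, which never block), then count the
-- # set once and mark its cells. Mutates `check` to the same final state as A.
--
-- def calc_15683(row, col, cctv, index, angle, check, n):
--     r, c, t = cctv[n][0], cctv[n][1], cctv[n][2]
--     codes = angle[t][index[n] % len(angle[t])]
--     covered = set()
--     for code in codes: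
--         if code == 0:
--             line = [((r, x), check[r][x]) for x in range(c + 1, col)]
--         elif code == 1:
--             line = [((y, c), check[y][c]) for y in range(r + 1, row)]
--         elif code == 2:
--             line = [((r, x), check[r][x]) for x in range(c - 1, -1, -1)]
--         else:
--             line = [((y, c), check[y][c]) for y in range(r - 1, -1, -1)]
--         vals = [v for _, v in line]
--         stop = vals.index(6) if 6 in vals else len(line)
--         for pos, v in line[:stop]:
--             if v == 0:
--                 covered.add(pos)
--     for y, x in covered:
--         check[y][x] = 7
--     return len(covered)
-- ===== Notes on version B (the rewrite author's own statement) =====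
-- stated objective: alternative
-- what changed: A counts while mutating the grid cell by cell (a write-then-count scan per direction, where later rays see earlier writes); B is a pure two-phase computation: it reads each ray from the ORIGINAL grid (cut at the first 6 via index/slice), accumulates the covered 0-cells into a set, returns the set's size and only then marks the grid -- correct because only 6 blocks and writes only turn 0s into 7s, which never block.
-- outside the precondition, e.g. on calc_15683(1, 3, [[0, 0, 0]], [0], [[[0]]], [[0, 6]], 0): A returns 0, B raises IndexError; on calc_15683(2, 2, [[-1, 0, 0]], [0], [[[0]]], [[0, 0], [0, 0]], 0): A returns 1, B returns 1
import Mathlib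
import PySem

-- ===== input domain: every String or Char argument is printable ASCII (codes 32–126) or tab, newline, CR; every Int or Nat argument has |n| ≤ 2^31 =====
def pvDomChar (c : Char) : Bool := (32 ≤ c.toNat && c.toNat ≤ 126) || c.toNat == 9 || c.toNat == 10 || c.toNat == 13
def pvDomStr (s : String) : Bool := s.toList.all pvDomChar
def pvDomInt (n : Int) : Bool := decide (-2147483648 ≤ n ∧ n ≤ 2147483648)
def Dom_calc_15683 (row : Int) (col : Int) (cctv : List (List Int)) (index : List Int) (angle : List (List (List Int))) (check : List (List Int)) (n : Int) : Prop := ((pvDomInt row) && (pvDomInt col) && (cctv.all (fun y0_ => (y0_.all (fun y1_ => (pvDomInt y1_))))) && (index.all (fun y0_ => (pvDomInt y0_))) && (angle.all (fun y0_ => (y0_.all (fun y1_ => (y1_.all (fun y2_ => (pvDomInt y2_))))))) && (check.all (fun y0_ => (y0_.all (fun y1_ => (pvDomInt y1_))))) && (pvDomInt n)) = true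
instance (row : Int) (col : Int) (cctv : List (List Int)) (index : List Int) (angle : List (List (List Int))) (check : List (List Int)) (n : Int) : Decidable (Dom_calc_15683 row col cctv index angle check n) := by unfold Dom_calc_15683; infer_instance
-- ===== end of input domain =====

-- A counts while mutating the grid cell by cell; B is a pure two-phase computation: it
-- collects the SET of covered 0-cells reading only the original grid (only 6 blocks, and
-- writes only turn 0s into 7s, which never block) and returns the set's size. Both
-- Pythons mutate `check` to the same final state; the theorems are about the RETURN value.

-- `check[y][x] = 7` — the same statement in both Pythons; exact for in-range 0 ≤ y,x,
-- which Pre_ guarantees for every executed write.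
def pvSet2 (check : List (List Int)) (y x v : Int) : List (List Int) :=
  PySem.List.pySetD check y (PySem.List.pySetD (PySem.List.pyGetD check y []) x v)

-- ===== PORT A =====
-- A's horizontal inner loop (dirs 0 and 2): row r fixed, x runs over the given range list.
def pvScanH (check : List (List Int)) (r : Int) (xs : List Int) (count : Int) : List (List Int) × Int :=
  match xs with
  | [] => (check, count)
  | x :: rest =>
    if PySem.List.pyGetD (PySem.List.pyGetD check r []) x 0 = 0 then
      pvScanH (pvSet2 check r x 7) r rest (count + 1)
    else if PySem.List.pyGetD (PySem.List.pyGetD check r []) x 0 = 6 then (check, count)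
    else pvScanH check r rest count

-- A's vertical inner loop (dirs 1 and else): column c fixed, y runs over the given range list.
def pvScanV (check : List (List Int)) (c : Int) (ys : List Int) (count : Int) : List (List Int) × Int :=
  match ys with
  | [] => (check, count)
  | y :: rest =>
    if PySem.List.pyGetD (PySem.List.pyGetD check y []) c 0 = 0 then
      pvScanV (pvSet2 check y c 7) c rest (count + 1)
    else if PySem.List.pyGetD (PySem.List.pyGetD check y []) c 0 = 6 then (check, count)
    else pvScanV check c rest count

def calc_15683 (row : Int) (col : Int) (cctv : List (List Int)) (index : List Int) (angle : List (List (List Int))) (check : List (List Int)) (n : Int) : Int :=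
  -- A recomputes cctv[n][..] / angle[..] at every use; the values never change, so they are
  -- let-bound once here (same values). pyGetD is exact under Pre_ (all indexings in range).
  let cam := PySem.List.pyGetD cctv n []
  let dirsets := PySem.List.pyGetD angle (PySem.List.pyGetD cam 2 0) []
  let codes := PySem.List.pyGetD dirsets
    (PySem.Int.mod (PySem.List.pyGetD index n 0) (PySem.List.len dirsets)) []
  -- 'for i in range(len(codes)): … codes[i] …' folded directly over codes (same elements in order)
  (codes.foldl (fun st code =>
    if code = 0 then
      pvScanH st.1 (PySem.List.pyGetD cam 0 0) (PySem.List.pyRange (PySem.List.pyGetD cam 1 0 + 1) col 1) st.2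
    else if code = 1 then
      pvScanV st.1 (PySem.List.pyGetD cam 1 0) (PySem.List.pyRange (PySem.List.pyGetD cam 0 0 + 1) row 1) st.2
    else if code = 2 then
      pvScanH st.1 (PySem.List.pyGetD cam 0 0) (PySem.List.pyRange (PySem.List.pyGetD cam 1 0 - 1) (-1) (-1)) st.2
    else
      pvScanV st.1 (PySem.List.pyGetD cam 1 0) (PySem.List.pyRange (PySem.List.pyGetD cam 0 0 - 1) (-1) (-1)) st.2)
    (check, 0)).2

-- ===== PORT B =====
-- `check[y][x]` — a read; exact for in-range indices, which Pre_ guarantees for every read.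
def pvCell (check : List (List Int)) (y x : Int) : Int :=
  PySem.List.pyGetD (PySem.List.pyGetD check y []) x 0

-- Source B's per-code `line = [((y,x), check[y][x]) for … in range(…)]` (the if/elif chain)
def pvLine (check : List (List Int)) (row col r c code : Int) : List ((Int × Int) × Int) :=
  if code = 0 then (PySem.List.pyRange (c + 1) col 1).map (fun x => ((r, x), pvCell check r x))
  else if code = 1 then (PySem.List.pyRange (r + 1) row 1).map (fun y => ((y, c), pvCell check y c))
  else if code = 2 then (PySem.List.pyRange (c - 1) (-1) (-1)).map (fun x => ((r, x), pvCell check r x))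
  else (PySem.List.pyRange (r - 1) (-1) (-1)).map (fun y => ((y, c), pvCell check y c))

-- Source B's ray step: 'vals = [v for _, v in line]; stop = vals.index(6) if 6 in vals else
-- len(line); for pos, v in line[:stop]: if v == 0: covered.add(pos)'
-- ('6 in vals' is index? isSome, so the conditional is the match below)
def pvRayAdd (covered : PySem.Set (Int × Int)) (line : List ((Int × Int) × Int)) : PySem.Set (Int × Int) :=
  let vals := line.map (fun pv => pv.2)
  let stop : Nat := match PySem.List.index? vals 6 with
    | some i => i
    | none => line.length
  (PySem.List.slice line (some 0) (some (Nat.cast stop : Int))).foldl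
    (fun s pv => if pv.2 = 0 then PySem.Set.add s pv.1 else s) covered

def calc_15683_alt (row : Int) (col : Int) (cctv : List (List Int)) (index : List Int) (angle : List (List (List Int))) (check : List (List Int)) (n : Int) : Int :=
  let cam := PySem.List.pyGetD cctv n []
  let r := PySem.List.pyGetD cam 0 0
  let c := PySem.List.pyGetD cam 1 0
  let dirsets := PySem.List.pyGetD angle (PySem.List.pyGetD cam 2 0) []
  let codes := PySem.List.pyGetD dirsets
    (PySem.Int.mod (PySem.List.pyGetD index n 0) (PySem.List.len dirsets)) []
  let covered := codes.foldl (fun s code => pvRayAdd s (pvLine check row col r c code)) PySem.Set.empty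
  -- 'return len(covered)' (the final marking loop does not affect the return value)
  (covered.length : Int)

-- ===== PRECONDITION & SPEC =====
-- Pre_ has two parts. The first is exactly what Python A evaluates before its loop: n a
-- valid (possibly negative, Python-style) index of cctv and index, the camera triple
-- complete, its type a valid index of angle owning a nonempty angle list — outside it A
-- raises (IndexError / ZeroDivisionError). The second requires, per direction code that
-- occurs, exactly that the cells its full ray visits exist in `check` (so every read A or
-- B performs is a real in-range access), or (second disjunct) that no ray visits any cell;
-- it excludes only inputs whose cell accesses rely on A's unchecked indexing
-- (negative-index wraparound, or a row too short behind a blocking 6, where B's eager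
-- ray read raises) — accidents of A's implementation (see claim cites).
def Pre_calc_15683 (row : Int) (col : Int) (cctv : List (List Int)) (index : List Int) (angle : List (List (List Int))) (check : List (List Int)) (n : Int) : Prop :=
  PySem.Raise.InRange cctv.length n ∧ PySem.Raise.InRange index.length n ∧
  3 ≤ (PySem.List.pyGetD cctv n []).length ∧
  PySem.Raise.InRange angle.length (PySem.List.pyGetD (PySem.List.pyGetD cctv n []) 2 0) ∧
  PySem.List.pyGetD angle (PySem.List.pyGetD (PySem.List.pyGetD cctv n []) 2 0) [] ≠ [] ∧
  ((0 ≤ PySem.List.pyGetD (PySem.List.pyGetD cctv n []) 0 0 ∧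
    0 ≤ PySem.List.pyGetD (PySem.List.pyGetD cctv n []) 1 0 ∧
    ∀ code ∈ PySem.List.pyGetD (PySem.List.pyGetD angle (PySem.List.pyGetD (PySem.List.pyGetD cctv n []) 2 0) [])
        (PySem.Int.mod (PySem.List.pyGetD index n 0)
          (PySem.List.len (PySem.List.pyGetD angle (PySem.List.pyGetD (PySem.List.pyGetD cctv n []) 2 0) []))) [],
      (code = 0 → PySem.List.pyGetD (PySem.List.pyGetD cctv n []) 1 0 + 1 < col →
        PySem.List.pyGetD (PySem.List.pyGetD cctv n []) 0 0 < (check.length : Int) ∧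
        col ≤ ((check.getD (PySem.List.pyGetD (PySem.List.pyGetD cctv n []) 0 0).toNat []).length : Int)) ∧
      (code = 1 → PySem.List.pyGetD (PySem.List.pyGetD cctv n []) 0 0 + 1 < row →
        row ≤ (check.length : Int) ∧
        ∀ l ∈ (check.drop (PySem.List.pyGetD (PySem.List.pyGetD cctv n []) 0 0 + 1).toNat).take
            (row - (PySem.List.pyGetD (PySem.List.pyGetD cctv n []) 0 0 + 1)).toNat,
          PySem.List.pyGetD (PySem.List.pyGetD cctv n []) 1 0 < (l.length : Int)) ∧
      (code = 2 → 0 < PySem.List.pyGetD (PySem.List.pyGetD cctv n []) 1 0 →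
        PySem.List.pyGetD (PySem.List.pyGetD cctv n []) 0 0 < (check.length : Int) ∧
        PySem.List.pyGetD (PySem.List.pyGetD cctv n []) 1 0 ≤ ((check.getD (PySem.List.pyGetD (PySem.List.pyGetD cctv n []) 0 0).toNat []).length : Int)) ∧
      (code ≠ 0 → code ≠ 1 → code ≠ 2 → 0 < PySem.List.pyGetD (PySem.List.pyGetD cctv n []) 0 0 →
        PySem.List.pyGetD (PySem.List.pyGetD cctv n []) 0 0 ≤ (check.length : Int) ∧
        ∀ l ∈ check.take (PySem.List.pyGetD (PySem.List.pyGetD cctv n []) 0 0).toNat,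
          PySem.List.pyGetD (PySem.List.pyGetD cctv n []) 1 0 < (l.length : Int))) ∨
   (∀ code ∈ PySem.List.pyGetD (PySem.List.pyGetD angle (PySem.List.pyGetD (PySem.List.pyGetD cctv n []) 2 0) [])
        (PySem.Int.mod (PySem.List.pyGetD index n 0)
          (PySem.List.len (PySem.List.pyGetD angle (PySem.List.pyGetD (PySem.List.pyGetD cctv n []) 2 0) []))) [],
      (code = 0 → col ≤ PySem.List.pyGetD (PySem.List.pyGetD cctv n []) 1 0 + 1) ∧
      (code = 1 → row ≤ PySem.List.pyGetD (PySem.List.pyGetD cctv n []) 0 0 + 1) ∧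
      (code = 2 → PySem.List.pyGetD (PySem.List.pyGetD cctv n []) 1 0 ≤ 0) ∧
      (code ≠ 0 → code ≠ 1 → code ≠ 2 → PySem.List.pyGetD (PySem.List.pyGetD cctv n []) 0 0 ≤ 0)))
instance (row : Int) (col : Int) (cctv : List (List Int)) (index : List Int) (angle : List (List (List Int))) (check : List (List Int)) (n : Int) : Decidable (Pre_calc_15683 row col cctv index angle check n) := by
  unfold Pre_calc_15683
  refine @instDecidableAnd _ _ ?_ (@instDecidableAnd _ _ ?_ (@instDecidableAnd _ _ ?_
    (@instDecidableAnd _ _ ?_ (@instDecidableAnd _ _ ?_ (@instDecidableOr _ _ ?_ ?_))))) <;>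
    try infer_instance
  refine @instDecidableAnd _ _ ?_ (@instDecidableAnd _ _ ?_ ?_) <;> try infer_instance
  refine @List.decidableBAll _ _ ?_ _
  intro code
  refine @instDecidableAnd _ _ ?_ (@instDecidableAnd _ _ ?_ (@instDecidableAnd _ _ ?_ ?_)) <;>
    infer_instance

def pvWitness_calc_15683 : Int × Int × List (List Int) × List Int × List (List (List Int)) × List (List Int) × Int :=
  (2, 2, [[0, 0, 0]], [0], [[[0, 1]]], [[0, 0], [0, 0]], 0)

def Spec_calc_15683 (row : Int) (col : Int) (cctv : List (List Int)) (index : List Int) (angle : List (List (List Int))) (check : List (List Int)) (n : Int) (out : Int) : Prop := out = calc_15683_alt row col cctv index angle check n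
instance (row : Int) (col : Int) (cctv : List (List Int)) (index : List Int) (angle : List (List (List Int))) (check : List (List Int)) (n : Int) (out : Int) : Decidable (Spec_calc_15683 row col cctv index angle check n out) := by unfold Spec_calc_15683; infer_instance

-- ===== CLAIM (what is proved, stated in full; the proofs are below) =====
def Claim_equal_calc_15683 : Prop := ∀ (row : Int) (col : Int) (cctv : List (List Int)) (index : List Int) (angle : List (List (List Int))) (check : List (List Int)) (n : Int), Dom_calc_15683 row col cctv index angle check n → Pre_calc_15683 row col cctv index angle check n → Spec_calc_15683 row col cctv index angle check n (calc_15683 row col cctv index angle check n)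

-- ===== LEMMAS AND PROOFS =====

-- p names a real cell of the original grid (both coordinates in range, nonnegative)
def pvVal (check0 : List (List Int)) (p : Int × Int) : Prop :=
  0 ≤ p.1 ∧ 0 ≤ p.2 ∧ p.1 < (check0.length : Int) ∧
  p.2 < ((check0.getD p.1.toNat []).length : Int)

-- ch has the same row structure (lengths) as the original grid
def pvShape (orig ch : List (List Int)) : Prop :=
  orig.length = ch.length ∧ ∀ i : Nat, (orig.getD i []).length = (ch.getD i []).length

-- the set S of already-covered cells written into the grid (A's mutation, replayed)
def pvMark (orig : List (List Int)) (S : List (Int × Int)) : List (List Int) :=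
  S.foldl (fun ch p => pvSet2 ch p.1 p.2 7) orig

-- A's inner loop, generalized over the list of visited coordinates
def pvScanG (check : List (List Int)) (ps : List (Int × Int)) (count : Int) : List (List Int) × Int :=
  match ps with
  | [] => (check, count)
  | p :: rest =>
    if pvCell check p.1 p.2 = 0 then pvScanG (pvSet2 check p.1 p.2 7) rest (count + 1)
    else if pvCell check p.1 p.2 = 6 then (check, count)
    else pvScanG check rest count

-- B's ray step, rephrased on the coordinate list (pure, reads only orig)
def pvRayFold (orig : List (List Int)) (S : PySem.Set (Int × Int)) (ps : List (Int × Int)) : PySem.Set (Int × Int) :=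
  (ps.takeWhile (fun p => pvCell orig p.1 p.2 != 6)).foldl
    (fun s p => if pvCell orig p.1 p.2 = 0 then PySem.Set.add s p else s) S

-- the loop invariant carried by B's covered set
def pvInv (orig : List (List Int)) (S : List (Int × Int)) : Prop :=
  S.Nodup ∧ ∀ p ∈ S, pvVal orig p ∧ pvCell orig p.1 p.2 = 0

theorem pvScanH_eq_G (r : Int) : ∀ (xs : List Int) (ch : List (List Int)) (cnt : Int),
    pvScanH ch r xs cnt = pvScanG ch (xs.map (fun x => (r, x))) cnt := by
  intro xs
  induction xs with
  | nil => intro ch cnt; rfl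
  | cons x rest ih =>
    intro ch cnt
    simp only [List.map_cons, pvScanH, pvScanG, pvCell]
    split_ifs <;> first | rfl | apply ih

theorem pvScanV_eq_G (c : Int) : ∀ (ys : List Int) (ch : List (List Int)) (cnt : Int),
    pvScanV ch c ys cnt = pvScanG ch (ys.map (fun y => (y, c))) cnt := by
  intro ys
  induction ys with
  | nil => intro ch cnt; rfl
  | cons y rest ih =>
    intro ch cnt
    simp only [List.map_cons, pvScanV, pvScanG, pvCell]
    split_ifs <;> first | rfl | apply ih

theorem pvGetD_set' {α : Type} (l : List α) (k i : Nat) (v d : α) (hi : i < l.length) :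
    (l.set k v).getD i d = if k = i then v else l.getD i d := by
  rw [List.getD_eq_getElem _ _ (by simpa using hi), List.getElem_set,
    List.getD_eq_getElem _ _ hi]

theorem pvGetD_set'' {α : Type} (l : List α) (k i : Nat) (v d : α) :
    (l.set k v).getD i d = if k = i ∧ i < l.length then v else l.getD i d := by
  by_cases hi : i < l.length
  · rw [pvGetD_set' _ _ _ _ _ hi]
    by_cases hk : k = i <;> simp [hk, hi]
  · rw [List.getD_eq_default _ _ (by simpa using not_lt.1 hi),
      List.getD_eq_default _ _ (not_lt.1 hi)]
    simp [hi]

theorem pvCell_toNat (ch : List (List Int)) {y x : Int} (hy : 0 ≤ y) (hx : 0 ≤ x) :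
    pvCell ch y x = (ch.getD y.toNat []).getD x.toNat 0 := by
  simp [pvCell, PySem.List.pyGetD_of_nonneg _ _ hy, PySem.List.pyGetD_of_nonneg _ _ hx]

theorem pvSet2_toNat (ch : List (List Int)) {y x : Int} (v : Int) (hy : 0 ≤ y) :
    pvSet2 ch y x v = ch.set y.toNat (PySem.List.pySetD (ch.getD y.toNat []) x v) := by
  simp [pvSet2, PySem.List.pySetD_of_nonneg _ _ hy, PySem.List.pyGetD_of_nonneg _ _ hy]

theorem pvShape_refl (orig : List (List Int)) : pvShape orig orig :=
  ⟨rfl, fun _ => rfl⟩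

theorem pvShape_set2 {orig ch : List (List Int)} {p : Int × Int}
    (hsh : pvShape orig ch) (hp1 : 0 ≤ p.1) :
    pvShape orig (pvSet2 ch p.1 p.2 7) := by
  rw [pvSet2_toNat ch 7 hp1]
  refine ⟨by simpa using hsh.1, fun i => ?_⟩
  rw [pvGetD_set'']
  split_ifs with h
  · rw [PySem.List.length_pySetD, ← h.1]
    exact hsh.2 _
  · exact hsh.2 i

theorem pvCell_set2 {orig ch : List (List Int)} {p q : Int × Int}
    (hsh : pvShape orig ch) (hp : pvVal orig p) (hq : pvVal orig q) :
    pvCell (pvSet2 ch p.1 p.2 7) q.1 q.2 = if q = p then 7 else pvCell ch q.1 q.2 := by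
  obtain ⟨hp1, hp2, hp3, hp4⟩ := hp
  obtain ⟨hq1, hq2, hq3, hq4⟩ := hq
  have hlen := hsh.1
  have hq1len : q.1.toNat < ch.length := by omega
  rw [pvSet2_toNat ch 7 hp1, pvCell_toNat _ hq1 hq2, pvGetD_set'']
  by_cases hyy : p.1 = q.1
  · rw [if_pos ⟨by omega, hq1len⟩, ← hyy, PySem.List.pySetD_of_nonneg _ _ hp2,
      pvGetD_set'']
    have hrow := hsh.2 p.1.toNat
    have hq4' : q.2.toNat < (ch.getD p.1.toNat []).length := by
      have e : p.1.toNat = q.1.toNat := by omega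
      rw [e, ← hsh.2 q.1.toNat]
      omega
    by_cases hxx : p.2 = q.2
    · rw [if_pos ⟨by omega, hq4'⟩, if_pos (by cases p; cases q; simp_all)]
    · rw [if_neg (by intro h; exact hxx (by omega)),
        if_neg (by intro h; exact hxx (by rw [h])), pvCell_toNat _ hp1 hq2]
  · rw [if_neg (by intro h; exact hyy (by omega)),
      if_neg (by intro h; exact hyy (by rw [h])), pvCell_toNat _ hq1 hq2]

theorem pvCell_mark {orig : List (List Int)} : ∀ (S : List (Int × Int)) (ch : List (List Int)),
    pvShape orig ch → (∀ p ∈ S, pvVal orig p) → ∀ q, pvVal orig q →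
    pvCell (pvMark ch S) q.1 q.2 = if q ∈ S then 7 else pvCell ch q.1 q.2 := by
  intro S
  induction S with
  | nil => intro ch _ _ q _; simp [pvMark]
  | cons p S ih =>
    intro ch hsh hS q hq
    have hp := hS p (List.mem_cons_self ..)
    have : pvMark ch (p :: S) = pvMark (pvSet2 ch p.1 p.2 7) S := rfl
    rw [this, ih _ (pvShape_set2 hsh hp.1) (fun r hr => hS r (List.mem_cons_of_mem _ hr)) q hq,
      pvCell_set2 hsh hp hq]
    by_cases h1 : q ∈ S <;> by_cases h2 : q = p <;> simp [h1, h2]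

theorem pvMark_append (ch : List (List Int)) (S : List (Int × Int)) (p : Int × Int) :
    pvMark ch (S ++ [p]) = pvSet2 (pvMark ch S) p.1 p.2 7 := by
  simp [pvMark, List.foldl_append]

theorem pvFoldAdd_inv {orig : List (List Int)} :
    ∀ (qs : List (Int × Int)) (S : List (Int × Int)), pvInv orig S →
    (∀ p ∈ qs, pvVal orig p) →
    pvInv orig (qs.foldl (fun s p => if pvCell orig p.1 p.2 = 0 then PySem.Set.add s p else s) S) := by
  intro qs
  induction qs with
  | nil => intro S hS _; exact hS
  | cons p qs ih =>
    intro S hS hq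
    refine ih _ ?_ (fun r hr => hq r (List.mem_cons_of_mem _ hr))
    dsimp only
    by_cases h : pvCell orig p.1 p.2 = 0
    · rw [if_pos h]
      refine ⟨PySem.Set.nodup_add _ _ hS.1, fun r hr => ?_⟩
      rcases (PySem.Set.mem_add _ _ _).1 hr with hr' | hr'
      · exact hS.2 r hr'
      · exact hr' ▸ ⟨hq p (List.mem_cons_self ..), h⟩
    · rw [if_neg h]; exact hS

theorem pvRayFold_inv {orig : List (List Int)} {S : List (Int × Int)}
    {ps : List (Int × Int)} (hS : pvInv orig S) (hps : ∀ p ∈ ps, pvVal orig p) :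
    pvInv orig (pvRayFold orig S ps) :=
  pvFoldAdd_inv _ _ hS (fun p hp => hps p (List.takeWhile_subset _ hp))

theorem pvRayFold_cons_ne {orig : List (List Int)} {p : Int × Int}
    (S : PySem.Set (Int × Int)) (rest : List (Int × Int)) (h : pvCell orig p.1 p.2 ≠ 6) :
    pvRayFold orig S (p :: rest)
      = pvRayFold orig (if pvCell orig p.1 p.2 = 0 then PySem.Set.add S p else S) rest := by
  simp [pvRayFold, h]

theorem pvRayFold_cons_six {orig : List (List Int)} {p : Int × Int}
    (S : PySem.Set (Int × Int)) (rest : List (Int × Int)) (h : pvCell orig p.1 p.2 = 6) :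
    pvRayFold orig S (p :: rest) = S := by
  simp [pvRayFold, h]

-- A's scan started on the S-marked grid is B's pure ray fold (plus the count delta)
theorem pvScanG_mark {orig : List (List Int)} :
    ∀ (ps : List (Int × Int)) (S : List (Int × Int)) (cnt : Int),
    (∀ p ∈ ps, pvVal orig p) → pvInv orig S →
    pvScanG (pvMark orig S) ps cnt
      = (pvMark orig (pvRayFold orig S ps),
         cnt + ((pvRayFold orig S ps).length : Int) - (S.length : Int)) := by
  intro ps
  induction ps with
  | nil =>
    intro S cnt _ _
    simp [pvScanG, pvRayFold]
  | cons p rest ih =>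
    intro S cnt hps hS
    have hp := hps p (List.mem_cons_self ..)
    have hrest := fun r hr => hps r (List.mem_cons_of_mem _ hr)
    have hcm := pvCell_mark S orig (pvShape_refl orig) (fun r hr => (hS.2 r hr).1) p hp
    simp only [pvScanG]
    rw [hcm]
    by_cases hpS : p ∈ S
    · have h0 : pvCell orig p.1 p.2 = 0 := (hS.2 p hpS).2
      rw [if_pos hpS]
      norm_num
      rw [pvRayFold_cons_ne S rest (by omega), if_pos h0, PySem.Set.add_of_mem hpS]
      exact ih S cnt hrest hS
    · rw [if_neg hpS]
      by_cases h0 : pvCell orig p.1 p.2 = 0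
      · rw [if_pos h0, ← pvMark_append, pvRayFold_cons_ne S rest (by omega), if_pos h0,
          PySem.Set.add_of_not_mem hpS]
        have hS' : pvInv orig (S ++ [p]) := by
          rw [← PySem.Set.add_of_not_mem hpS]
          refine ⟨PySem.Set.nodup_add _ _ hS.1, fun r hr => ?_⟩
          rcases (PySem.Set.mem_add _ _ _).1 hr with hr' | hr'
          · exact hS.2 r hr'
          · exact hr' ▸ ⟨hp, h0⟩
        rw [ih (S ++ [p]) (cnt + 1) hrest hS']
        refine Prod.ext rfl ?_
        simp only [List.length_append, List.length_cons, List.length_nil]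
        push_cast
        ring
      · by_cases h6 : pvCell orig p.1 p.2 = 6
        · rw [if_neg h0, if_pos h6, pvRayFold_cons_six S rest h6]
          refine Prod.ext rfl ?_
          ring
        · rw [if_neg h0, if_neg h6, pvRayFold_cons_ne S rest h6, if_neg h0]
          exact ih S cnt hrest hS

-- Source B's index/slice cut is exactly takeWhile (≠ 6)
theorem pvTake_stop : ∀ (line : List ((Int × Int) × Int)),
    line.take (match PySem.List.index? (line.map (fun pv => pv.2)) 6 with
      | some i => i | none => line.length)
      = line.takeWhile (fun pv => pv.2 != 6) := by
  intro line
  induction line with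
  | nil => simp [PySem.List.index?]
  | cons pv rest ih =>
    by_cases h : pv.2 = 6
    · rw [List.map_cons, h, PySem.List.index?_cons_self]
      simp [h]
    · rw [List.map_cons, PySem.List.index?_cons_of_ne _ h]
      cases hidx : PySem.List.index? (rest.map (fun pv => pv.2)) 6 with
      | none =>
        rw [hidx] at ih
        simp only [Option.map_none, List.length_cons, List.take_succ_cons,
          List.takeWhile_cons]
        simp [h, ih]
      | some i =>
        rw [hidx] at ih
        simp only [Option.map_some, List.take_succ_cons, List.takeWhile_cons]
        simp [h, ih]

-- B's ray step over a line of (coordinate, value) pairs is the pure ray fold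
theorem pvRayAdd_eq (f : Int × Int → Int) (ps : List (Int × Int)) (S : PySem.Set (Int × Int)) :
    pvRayAdd S (ps.map (fun p => (p, f p)))
      = (ps.takeWhile (fun p => f p != 6)).foldl
          (fun s p => if f p = 0 then PySem.Set.add s p else s) S := by
  unfold pvRayAdd
  dsimp only
  rw [PySem.List.slice_zero_start, PySem.List.slice_to_natCast, pvTake_stop,
    List.takeWhile_map, List.foldl_map]
  rfl

theorem pvMem_pyRange_down : ∀ (k : Nat) (a x : Int), a < (k : Int) →
    x ∈ PySem.List.pyRange a (-1) (-1) → 0 ≤ x ∧ x ≤ a := by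
  intro k
  induction k with
  | zero =>
    intro a x h hx
    rw [PySem.List.pyRange_neg_one_eq_nil (by omega)] at hx
    cases hx
  | succ k ih =>
    intro a x h hx
    by_cases ha : a ≤ -1
    · rw [PySem.List.pyRange_neg_one_eq_nil (by omega)] at hx
      cases hx
    · rw [PySem.List.pyRange_neg_one_cons (by omega)] at hx
      rcases List.mem_cons.1 hx with rfl | hx'
      · omega
      · have := ih (a - 1) x (by omega) hx'
        omega

-- one code: A's branch-scan from the S-marked grid = B's pvRayAdd of the line, plus count delta
theorem pvStep_eq {row col : Int} {check : List (List Int)}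
    {r c : Int} (hr0 : 0 ≤ r) (hc0 : 0 ≤ c)
    (code : Int)
    (hcd : (code = 0 → c + 1 < col →
              r < (check.length : Int) ∧ col ≤ ((check.getD r.toNat []).length : Int)) ∧
           (code = 1 → r + 1 < row →
              row ≤ (check.length : Int) ∧
              ∀ l ∈ (check.drop (r + 1).toNat).take (row - (r + 1)).toNat, c < (l.length : Int)) ∧
           (code = 2 → 0 < c →
              r < (check.length : Int) ∧ c ≤ ((check.getD r.toNat []).length : Int)) ∧
           (code ≠ 0 → code ≠ 1 → code ≠ 2 → 0 < r →
              r ≤ (check.length : Int) ∧ ∀ l ∈ check.take r.toNat, c < (l.length : Int)))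
    (S : List (Int × Int)) (cnt : Int) (hS : pvInv check S) :
    (if code = 0 then pvScanH (pvMark check S) r (PySem.List.pyRange (c + 1) col 1) cnt
     else if code = 1 then pvScanV (pvMark check S) c (PySem.List.pyRange (r + 1) row 1) cnt
     else if code = 2 then pvScanH (pvMark check S) r (PySem.List.pyRange (c - 1) (-1) (-1)) cnt
     else pvScanV (pvMark check S) c (PySem.List.pyRange (r - 1) (-1) (-1)) cnt)
      = (pvMark check (pvRayAdd S (pvLine check row col r c code)),
         cnt + ((pvRayAdd S (pvLine check row col r c code)).length : Int) - (S.length : Int))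
      ∧ pvInv check (pvRayAdd S (pvLine check row col r c code)) := by
  have key : ∀ (ps : List (Int × Int)), (∀ p ∈ ps, pvVal check p) →
      ∀ (scan : List (Int × Int) → Int → List (List Int) × Int), scan = pvScanG (pvMark check S) →
      scan ps cnt
        = (pvMark check (pvRayAdd S (ps.map (fun p => (p, pvCell check p.1 p.2)))),
           cnt + ((pvRayAdd S (ps.map (fun p => (p, pvCell check p.1 p.2)))).length : Int) - (S.length : Int))
      ∧ pvInv check (pvRayAdd S (ps.map (fun p => (p, pvCell check p.1 p.2)))) := by
    intro ps hps scan hscan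
    rw [pvRayAdd_eq (fun p => pvCell check p.1 p.2) ps S]
    have hrf : ((ps.takeWhile fun p => pvCell check p.1 p.2 != 6).foldl
        (fun s p => if pvCell check p.1 p.2 = 0 then PySem.Set.add s p else s) S)
        = pvRayFold check S ps := rfl
    rw [hrf, hscan]
    exact ⟨pvScanG_mark ps S cnt hps hS, pvRayFold_inv hS hps⟩
  by_cases h0 : code = 0
  · subst h0
    simp only [pvLine, if_true, pvScanH_eq_G r]
    have hline : (PySem.List.pyRange (c + 1) col 1).map (fun x => ((r, x), pvCell check r x))
        = ((PySem.List.pyRange (c + 1) col 1).map (fun x => ((r : Int), x))).map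
            (fun p => (p, pvCell check p.1 p.2)) := by
      simp [List.map_map, Function.comp_def]
    rw [hline]
    refine key _ ?_ _ rfl
    intro p hp
    simp only [List.mem_map] at hp
    obtain ⟨x, hx, rfl⟩ := hp
    have hxr := PySem.List.mem_pyRange_one.1 hx
    obtain ⟨hA, hB⟩ := hcd.1 rfl (by omega)
    exact ⟨hr0, by omega, hA, by show x < ((check.getD r.toNat []).length : Int); omega⟩
  · by_cases h1 : code = 1
    · subst h1
      simp only [pvLine, if_neg h0, pvScanV_eq_G c]
      have hline : (PySem.List.pyRange (r + 1) row 1).map (fun y => ((y, c), pvCell check y c))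
          = ((PySem.List.pyRange (r + 1) row 1).map (fun y => (y, (c : Int)))).map
              (fun p => (p, pvCell check p.1 p.2)) := by
        simp [List.map_map, Function.comp_def]
      rw [hline]
      refine key _ ?_ _ rfl
      intro p hp
      simp only [List.mem_map] at hp
      obtain ⟨y, hy, rfl⟩ := hp
      have hyr := PySem.List.mem_pyRange_one.1 hy
      obtain ⟨hA, hB⟩ := hcd.2.1 rfl (by omega)
      have hylen : y.toNat < check.length := by omega
      refine ⟨by omega, hc0, by show y < ((check.length : Nat) : Int); omega, ?_⟩
      have hi : y.toNat - (r + 1).toNat < ((check.drop (r + 1).toNat).take (row - (r + 1)).toNat).length := by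
        simp [List.length_take, List.length_drop]
        omega
      have hgd : ((check.drop (r + 1).toNat).take (row - (r + 1)).toNat)[y.toNat - (r + 1).toNat] = check.getD y.toNat [] := by
        rw [List.getElem_take, List.getElem_drop,
          List.getD_eq_getElem _ _ hylen]
        congr 1
        omega
      have := hB _ (hgd ▸ List.getElem_mem hi)
      exact this
    · by_cases h2 : code = 2
      · subst h2
        simp only [pvLine, if_neg h0, if_neg h1, pvScanH_eq_G r]
        have hline : (PySem.List.pyRange (c - 1) (-1) (-1)).map (fun x => ((r, x), pvCell check r x))
            = ((PySem.List.pyRange (c - 1) (-1) (-1)).map (fun x => ((r : Int), x))).map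
                (fun p => (p, pvCell check p.1 p.2)) := by
          simp [List.map_map, Function.comp_def]
        rw [hline]
        refine key _ ?_ _ rfl
        intro p hp
        simp only [List.mem_map] at hp
        obtain ⟨x, hx, rfl⟩ := hp
        have hxr := pvMem_pyRange_down (c - 1 + 1).toNat (c - 1) x (by omega) hx
        obtain ⟨hA, hB⟩ := hcd.2.2.1 rfl (by omega)
        exact ⟨hr0, by omega, hA, by show x < ((check.getD r.toNat []).length : Int); omega⟩
      · simp only [pvLine, if_neg h0, if_neg h1, if_neg h2, pvScanV_eq_G c]
        have hline : (PySem.List.pyRange (r - 1) (-1) (-1)).map (fun y => ((y, c), pvCell check y c))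
            = ((PySem.List.pyRange (r - 1) (-1) (-1)).map (fun y => (y, (c : Int)))).map
                (fun p => (p, pvCell check p.1 p.2)) := by
          simp [List.map_map, Function.comp_def]
        rw [hline]
        refine key _ ?_ _ rfl
        intro p hp
        simp only [List.mem_map] at hp
        obtain ⟨y, hy, rfl⟩ := hp
        have hyr := pvMem_pyRange_down (r - 1 + 1).toNat (r - 1) y (by omega) hy
        obtain ⟨hA, hB⟩ := hcd.2.2.2 h0 h1 h2 (by omega)
        have hylen : y.toNat < check.length := by omega
        refine ⟨by omega, hc0, by show y < ((check.length : Nat) : Int); omega, ?_⟩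
        have hi : y.toNat < (check.take r.toNat).length := by
          simp [List.length_take]
          omega
        have hgd : (check.take r.toNat)[y.toNat] = check.getD y.toNat [] := by
          rw [List.getElem_take, List.getD_eq_getElem _ _ hylen]
        exact hB _ (hgd ▸ List.getElem_mem hi)

-- the whole per-camera loop, main branch of Pre_
theorem pvFold_main {row col : Int} {check : List (List Int)}
    {r c : Int} (hr0 : 0 ≤ r) (hc0 : 0 ≤ c) :
    ∀ (codes : List Int),
    (∀ code ∈ codes,
      (code = 0 → c + 1 < col →
         r < (check.length : Int) ∧ col ≤ ((check.getD r.toNat []).length : Int)) ∧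
      (code = 1 → r + 1 < row →
         row ≤ (check.length : Int) ∧
         ∀ l ∈ (check.drop (r + 1).toNat).take (row - (r + 1)).toNat, c < (l.length : Int)) ∧
      (code = 2 → 0 < c →
         r < (check.length : Int) ∧ c ≤ ((check.getD r.toNat []).length : Int)) ∧
      (code ≠ 0 → code ≠ 1 → code ≠ 2 → 0 < r →
         r ≤ (check.length : Int) ∧ ∀ l ∈ check.take r.toNat, c < (l.length : Int))) →
    ∀ (S : List (Int × Int)) (cnt : Int), pvInv check S →
    codes.foldl (fun st code =>
        if code = 0 then pvScanH st.1 r (PySem.List.pyRange (c + 1) col 1) st.2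
        else if code = 1 then pvScanV st.1 c (PySem.List.pyRange (r + 1) row 1) st.2
        else if code = 2 then pvScanH st.1 r (PySem.List.pyRange (c - 1) (-1) (-1)) st.2
        else pvScanV st.1 c (PySem.List.pyRange (r - 1) (-1) (-1)) st.2)
      (pvMark check S, cnt)
      = (pvMark check (codes.foldl (fun s code => pvRayAdd s (pvLine check row col r c code)) S),
         cnt + ((codes.foldl (fun s code => pvRayAdd s (pvLine check row col r c code)) S).length : Int)
           - (S.length : Int)) := by
  intro codes
  induction codes with
  | nil =>
    intro _ S cnt _
    simp
  | cons code rest ih =>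
    intro hcds S cnt hS
    rw [List.foldl_cons, List.foldl_cons]
    dsimp only
    obtain ⟨heq, hinv⟩ := pvStep_eq hr0 hc0 code (hcds code (List.mem_cons_self ..)) S cnt hS
    rw [heq, ih (fun x hx => hcds x (List.mem_cons_of_mem _ hx)) _ _ hinv]
    refine Prod.ext rfl ?_
    ring

-- empty-ray branch: B's per-code step on an empty line is the identity
theorem pvRayAdd_nil (S : PySem.Set (Int × Int)) : pvRayAdd S [] = S := rfl

theorem pvFold_empty {row col r c : Int} {check : List (List Int)} :
    ∀ (codes : List Int),
    (∀ code ∈ codes, (code = 0 → col ≤ c + 1) ∧ (code = 1 → row ≤ r + 1) ∧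
      (code = 2 → c ≤ 0) ∧ (code ≠ 0 → code ≠ 1 → code ≠ 2 → r ≤ 0)) →
    (∀ (st : List (List Int) × Int),
      codes.foldl (fun st code =>
        if code = 0 then pvScanH st.1 r (PySem.List.pyRange (c + 1) col 1) st.2
        else if code = 1 then pvScanV st.1 c (PySem.List.pyRange (r + 1) row 1) st.2
        else if code = 2 then pvScanH st.1 r (PySem.List.pyRange (c - 1) (-1) (-1)) st.2
        else pvScanV st.1 c (PySem.List.pyRange (r - 1) (-1) (-1)) st.2) st = st)
    ∧ (∀ (S : PySem.Set (Int × Int)),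
      codes.foldl (fun s code => pvRayAdd s (pvLine check row col r c code)) S = S) := by
  intro codes
  induction codes with
  | nil => intro _; exact ⟨fun st => rfl, fun S => rfl⟩
  | cons code rest ih =>
    intro h
    have hcd := h code (List.mem_cons_self ..)
    have ihr := ih (fun x hx => h x (List.mem_cons_of_mem _ hx))
    have hstep : ∀ (st : List (List Int) × Int),
        (if code = 0 then pvScanH st.1 r (PySem.List.pyRange (c + 1) col 1) st.2
         else if code = 1 then pvScanV st.1 c (PySem.List.pyRange (r + 1) row 1) st.2
         else if code = 2 then pvScanH st.1 r (PySem.List.pyRange (c - 1) (-1) (-1)) st.2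
         else pvScanV st.1 c (PySem.List.pyRange (r - 1) (-1) (-1)) st.2) = st := by
      intro st
      by_cases h0 : code = 0
      · rw [if_pos h0, PySem.List.pyRange_one_eq_nil (by have := hcd.1 h0; omega)]
        rfl
      · by_cases h1 : code = 1
        · rw [if_neg h0, if_pos h1, PySem.List.pyRange_one_eq_nil (by have := hcd.2.1 h1; omega)]
          rfl
        · by_cases h2 : code = 2
          · rw [if_neg h0, if_neg h1, if_pos h2,
              PySem.List.pyRange_neg_one_eq_nil (by have := hcd.2.2.1 h2; omega)]
            rfl
          · rw [if_neg h0, if_neg h1, if_neg h2,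
              PySem.List.pyRange_neg_one_eq_nil (by have := hcd.2.2.2 h0 h1 h2; omega)]
            rfl
    have hline : pvLine check row col r c code = [] := by
      unfold pvLine
      by_cases h0 : code = 0
      · rw [if_pos h0, PySem.List.pyRange_one_eq_nil (by have := hcd.1 h0; omega)]
        rfl
      · by_cases h1 : code = 1
        · rw [if_neg h0, if_pos h1, PySem.List.pyRange_one_eq_nil (by have := hcd.2.1 h1; omega)]
          rfl
        · by_cases h2 : code = 2
          · rw [if_neg h0, if_neg h1, if_pos h2,
              PySem.List.pyRange_neg_one_eq_nil (by have := hcd.2.2.1 h2; omega)]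
            rfl
          · rw [if_neg h0, if_neg h1, if_neg h2,
              PySem.List.pyRange_neg_one_eq_nil (by have := hcd.2.2.2 h0 h1 h2; omega)]
            rfl
    constructor
    · intro st
      rw [List.foldl_cons, hstep st]
      exact ihr.1 st
    · intro S
      rw [List.foldl_cons, hline, pvRayAdd_nil]
      exact ihr.2 S

-- ===== VERDICT (by name: the statement is the Claim_ definition above) =====
theorem calc_15683_spec : Claim_equal_calc_15683 := by
  intro row col cctv index angle check n _hDom hPre
  obtain ⟨_, _, _, _, _, hOr⟩ := hPre
  unfold Spec_calc_15683
  simp only [calc_15683, calc_15683_alt]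
  rcases hOr with ⟨hr0, hc0, hcds⟩ | hE
  · have h := pvFold_main (row := row) (col := col) (check := check) hr0 hc0
      (PySem.List.pyGetD (PySem.List.pyGetD angle (PySem.List.pyGetD (PySem.List.pyGetD cctv n []) 2 0) [])
        (PySem.Int.mod (PySem.List.pyGetD index n 0)
          (PySem.List.len (PySem.List.pyGetD angle (PySem.List.pyGetD (PySem.List.pyGetD cctv n []) 2 0) []))) [])
      hcds [] 0 ⟨List.nodup_nil, by simp⟩
    simp only [pvMark, List.foldl_nil] at h
    rw [h]
    simp [PySem.Set.empty]
  · have h := pvFold_empty (row := row) (col := col)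
      (r := PySem.List.pyGetD (PySem.List.pyGetD cctv n []) 0 0)
      (c := PySem.List.pyGetD (PySem.List.pyGetD cctv n []) 1 0) (check := check) _ hE
    rw [h.1 (check, 0), h.2 PySem.Set.empty]
    rfl
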